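-- pv_equiv track=rewrite | github.com/nen9mA0/Instruction-Generator | myInsGen/encoder/PredictAssembly.py | GetWildCardPosLst
-- ===== SOURCE A (Python) =====
-- def GetWildCardPosLst(bytes_rule_lst, bytes_rule_gap):
--     wildcard_pos_lst = []
--     pos = 0
--     for i in range(len(bytes_rule_lst)):
--         pos += len(bytes_rule_lst[i])
--         if i >= len(bytes_rule_gap):
--             break
--         for j in range(bytes_rule_gap[i]):
--             wildcard_pos_lst.append(pos)
--             pos += 1
--     return wildcard_pos_lst
-- ===== SOURCE B (Python) =====
-- def GetWildCardPosLst(bytes_rule_lst, bytes_rule_gap):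
--     n = min(len(bytes_rule_lst), len(bytes_rule_gap))
--     lens = [len(r) for r in bytes_rule_lst[:n]]
--     gaps = [max(g, 0) for g in bytes_rule_gap[:n]]
--     starts = []
--     total = 0
--     for l, g in zip(lens, gaps):
--         starts.append(total + l)
--         total += l + g
--     return [p for s, g in zip(starts, gaps) for p in range(s, s + g)]
-- ===== Notes on version B (the rewrite author's own statement) =====
-- stated objective: alternative
-- what changed: A threads one mutable position pointer through an interleaved loop (with a break when gaps run out); B truncates to n = min(len(lst), len(gap)), tabulates rule lengths and clamped gaps, computes a block-start offset table in one prefix pass, then concatenates range(start, start+gap) per block.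
import Mathlib
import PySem

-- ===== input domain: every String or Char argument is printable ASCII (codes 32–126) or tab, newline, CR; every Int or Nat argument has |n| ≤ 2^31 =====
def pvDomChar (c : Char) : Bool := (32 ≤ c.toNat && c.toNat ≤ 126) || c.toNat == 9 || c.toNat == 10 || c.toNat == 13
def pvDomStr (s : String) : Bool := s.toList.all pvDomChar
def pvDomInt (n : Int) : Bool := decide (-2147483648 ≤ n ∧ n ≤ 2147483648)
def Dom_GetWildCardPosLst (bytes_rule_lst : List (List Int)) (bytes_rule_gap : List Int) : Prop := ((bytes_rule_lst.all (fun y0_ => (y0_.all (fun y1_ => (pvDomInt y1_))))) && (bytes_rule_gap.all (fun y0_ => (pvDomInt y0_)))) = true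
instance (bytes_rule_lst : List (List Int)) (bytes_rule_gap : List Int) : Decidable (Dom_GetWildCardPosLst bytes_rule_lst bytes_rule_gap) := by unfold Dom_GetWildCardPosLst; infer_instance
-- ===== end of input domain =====

-- B replaces A's interleaved loop (one mutable position pointer, break) by an offset-table
-- decomposition: truncate to n = min length, tabulate lengths/gaps, one prefix pass for block
-- starts, then concatenate ranges (objective: alternative decomposition, same cost).

-- ===== PORT A =====
-- inner loop: for j in range(g): append pos; pos += 1   (state = (wildcard_pos_lst, pos))
def pvAInner (g : Int) (st : List Int × Int) : List Int × Int :=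
  (PySem.List.pyRange 0 g 1).foldl (fun s _ => (s.1 ++ [s.2], s.2 + 1)) st

-- outer loop over the rules; running out of gaps = the 'break'
def pvALoop : List (List Int) → List Int → List Int × Int → List Int
  | [], _, st => st.1
  | r :: rs, gaps, st =>
    let pos := st.2 + (r.length : Int)
    match gaps with
    | [] => st.1
    | g :: gs => pvALoop rs gs (pvAInner g (st.1, pos))

def GetWildCardPosLst (bytes_rule_lst : List (List Int)) (bytes_rule_gap : List Int) : List Int :=
  pvALoop bytes_rule_lst bytes_rule_gap ([], 0)

-- ===== PORT B =====
-- for l, g in zip(lens, gaps): starts.append(total + l); total += l + g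
def pvBStarts : List (Int × Int) → Int → List Int
  | [], _ => []
  | (l, g) :: ps, total => (total + l) :: pvBStarts ps (total + l + g)

def GetWildCardPosLst_alt (bytes_rule_lst : List (List Int)) (bytes_rule_gap : List Int) : List Int :=
  let n := min bytes_rule_lst.length bytes_rule_gap.length
  let lens := (bytes_rule_lst.take n).map (fun r => (r.length : Int))
  let gaps := (bytes_rule_gap.take n).map (fun g => max g 0)
  let starts := pvBStarts (lens.zip gaps) 0
  (starts.zip gaps).flatMap (fun sg => PySem.List.pyRange sg.1 (sg.1 + sg.2) 1)

-- ===== PRECONDITION & SPEC =====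
def Spec_GetWildCardPosLst (bytes_rule_lst : List (List Int)) (bytes_rule_gap : List Int) (out : List Int) : Prop := out = GetWildCardPosLst_alt bytes_rule_lst bytes_rule_gap
instance (bytes_rule_lst : List (List Int)) (bytes_rule_gap : List Int) (out : List Int) : Decidable (Spec_GetWildCardPosLst bytes_rule_lst bytes_rule_gap out) := by unfold Spec_GetWildCardPosLst; infer_instance

-- ===== CLAIM (what is proved, stated in full; the proofs are below) =====
def Claim_equal_GetWildCardPosLst : Prop := ∀ (bytes_rule_lst : List (List Int)) (bytes_rule_gap : List Int), Dom_GetWildCardPosLst bytes_rule_lst bytes_rule_gap → Spec_GetWildCardPosLst bytes_rule_lst bytes_rule_gap (GetWildCardPosLst bytes_rule_lst bytes_rule_gap)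

-- ===== LEMMAS AND PROOFS =====

-- canonical form both programs reduce to: blocks of (length, nonneg gap) pairs
def pvCore : List (Int × Int) → Int → List Int
  | [], _ => []
  | (l, g) :: ps, pos =>
      PySem.List.pyRange (pos + l) (pos + l + g) 1 ++ pvCore ps (pos + l + g)

theorem pvFoldlCount (l : List Int) (acc : List Int) (pos : Int) :
    l.foldl (fun s _ => (s.1 ++ [s.2], s.2 + 1)) (acc, pos)
      = (acc ++ PySem.List.pyRange pos (pos + l.length) 1, pos + l.length) := by
  induction l generalizing acc pos with
  | nil => simp [PySem.List.pyRange_one_eq_nil (le_refl pos)]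
  | cons x xs ih =>
      have hx : (0:Int) ≤ (xs.length : Int) := Int.natCast_nonneg _
      simp only [List.foldl_cons, ih, List.length_cons]
      have hcast : (((xs.length + 1 : Nat)) : Int) = (xs.length : Int) + 1 := by push_cast; ring
      rw [hcast, PySem.List.pyRange_one_cons (a := pos) (b := pos + ((xs.length:Int)+1)) (by omega)]
      have harith : pos + 1 + (xs.length : Int) = pos + ((xs.length:Int)+1) := by ring
      rw [harith]
      simp

theorem pvAInner_eq (g : Int) (acc : List Int) (pos : Int) :
    pvAInner g (acc, pos)
      = (acc ++ PySem.List.pyRange pos (pos + max g 0) 1, pos + max g 0) := by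
  unfold pvAInner
  rw [pvFoldlCount]
  have hlen : ((PySem.List.pyRange 0 g 1).length : Int) = max g 0 := by
    rw [PySem.List.length_pyRange_one]; omega
  rw [hlen]

theorem pvALoop_eq (lst : List (List Int)) (gaps : List Int) (acc : List Int) (pos : Int) :
    pvALoop lst gaps (acc, pos)
      = acc ++ pvCore ((lst.map (fun r => (r.length : Int))).zip
                        (gaps.map (fun g => max g 0))) pos := by
  induction lst generalizing gaps acc pos with
  | nil => simp [pvALoop, pvCore]
  | cons r rs ih =>
      cases gaps with
      | nil => simp [pvALoop, pvCore]
      | cons g gs =>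
          simp only [pvALoop, List.map_cons, List.zip_cons_cons, pvCore]
          rw [pvAInner_eq, ih]
          simp

theorem pvBStarts_eq (ps : List (Int × Int)) (pos : Int) :
    ((pvBStarts ps pos).zip (ps.map Prod.snd)).flatMap
        (fun sg => PySem.List.pyRange sg.1 (sg.1 + sg.2) 1)
      = pvCore ps pos := by
  induction ps generalizing pos with
  | nil => simp [pvBStarts, pvCore]
  | cons p ps ih =>
      obtain ⟨l, g⟩ := p
      simp only [pvBStarts, List.map_cons, List.zip_cons_cons, List.flatMap_cons, pvCore, ih]

theorem pvZipTakeMin {α β : Type} : ∀ (l : List α) (m : List β),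
    (l.take (min l.length m.length)).zip (m.take (min l.length m.length)) = l.zip m := by
  intro l
  induction l with
  | nil => intro m; simp
  | cons a l ih =>
      intro m
      cases m with
      | nil => simp
      | cons b m =>
          simp only [List.length_cons, Nat.succ_min_succ, List.take_succ_cons,
            List.zip_cons_cons, ih]

theorem pvZipTake (lst : List (List Int)) (gap : List Int) :
    (((lst.take (min lst.length gap.length)).map (fun r => (r.length : Int))).zip
        ((gap.take (min lst.length gap.length)).map (fun g => max g 0)))
      = (lst.map (fun r => (r.length : Int))).zip (gap.map (fun g => max g 0)) := by
  rw [List.map_take, List.map_take]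
  have h := pvZipTakeMin (lst.map (fun r => (r.length : Int))) (gap.map (fun g => max g 0))
  simpa using h

theorem pvAlt_eq (lst : List (List Int)) (gap : List Int) :
    GetWildCardPosLst_alt lst gap
      = pvCore ((lst.map (fun r => (r.length : Int))).zip (gap.map (fun g => max g 0))) 0 := by
  unfold GetWildCardPosLst_alt
  simp only []
  rw [← pvBStarts_eq ((lst.map (fun r => (r.length : Int))).zip (gap.map (fun g => max g 0))) 0]
  rw [← pvZipTake lst gap]
  congr 1
  rw [List.map_snd_zip (by simp)]

-- ===== VERDICT (by name: the statement is the Claim_ definition above) =====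
theorem GetWildCardPosLst_spec : Claim_equal_GetWildCardPosLst := by
  intro lst gap _
  unfold Spec_GetWildCardPosLst GetWildCardPosLst
  rw [pvALoop_eq, pvAlt_eq]
  simp
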